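-- pv_equiv track=rewrite | github.com/renukadeshmukh/Leetcode_Solutions | 1170_CompareStringsbyFrequencyoftheSmallestCharacter.py | f
-- ===== SOURCE A (Python) =====
-- def f(s):
--     freq = 0
--     ch = 'z'
--     for c in s:
--         if c < ch:
--             ch = c
--             freq = 1
--         elif c == ch:
--             freq += 1
--     return freq
-- ===== SOURCE B (Python) =====
-- def f(s):
--     if not s:
--         return 0
--     return s.count(min(s))
-- ===== Notes on version B (the rewrite author's own statement) =====
-- stated objective: simpler
-- what changed: Replaces A's single-pass running min-and-tally loop with a two-pass decomposition: find the smallest character with min(), then count its occurrences with str.count.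
-- intended difference: On nonempty strings whose characters are all greater than 'z' (only '{', '|', '}', '~' in printable ASCII), A returns 0 because of its incidental ch='z' initializer, while B returns the count of the true smallest character, which is the intended frequency of the smallest character. — e.g. on f("{"): A returns 0, B returns 1
import Mathlib
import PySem

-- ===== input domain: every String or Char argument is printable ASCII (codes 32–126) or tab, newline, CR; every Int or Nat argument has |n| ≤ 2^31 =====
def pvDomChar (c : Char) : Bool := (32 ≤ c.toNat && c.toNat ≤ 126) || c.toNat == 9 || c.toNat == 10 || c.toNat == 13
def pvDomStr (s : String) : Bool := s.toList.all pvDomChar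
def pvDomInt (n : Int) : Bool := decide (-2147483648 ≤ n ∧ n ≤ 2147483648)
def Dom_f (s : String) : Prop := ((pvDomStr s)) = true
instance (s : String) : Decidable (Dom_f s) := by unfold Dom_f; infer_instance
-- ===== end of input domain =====

-- B computes frequency of the smallest character via min-then-count instead of A's running tally ("simpler").
-- Intended difference (D_f): on nonempty strings made only of characters above 'z', A's ch='z' initializer makes it return 0; B returns the count of the true minimum.

-- ===== PORT A =====
def f (s : String) : Int :=
  (s.toList.foldl (fun (st : Int × Char) c =>
      if c < st.2 then (1, c)
      else if c = st.2 then (st.1 + 1, st.2)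
      else st) (0, 'z')).1

-- ===== PORT B =====
-- Source B: `if not s: return 0; return s.count(min(s))`; min(s) over a string is the least character,
-- and s.count(min(s)) with a one-character needle equals counting that character.
def f_alt (s : String) : Int :=
  match PySem.List.min? s.toList (fun c => c) with
  | none => 0
  | some m => PySem.List.count s.toList m

-- ===== PRECONDITION & SPEC =====
-- On nonempty strings whose characters are all greater than 'z', A returns 0 (an artefact of its
-- ch='z' initializer) while B returns the count of the actual smallest character, the intended value.
def D_f (s : String) : Prop := s.toList ≠ [] ∧ ∀ c ∈ s.toList, 'z' < c
instance (s : String) : Decidable (D_f s) := by unfold D_f; infer_instance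

def Spec_f (s : String) (out : Int) : Prop := ¬ D_f s → out = f_alt s
instance (s : String) (out : Int) : Decidable (Spec_f s out) := by unfold Spec_f; infer_instance

def pvDiffWitness_f : String := "{"
def pvDiffWitnessOut_f : Int × Int := (0, 1)

-- ===== CLAIM (what is proved, stated in full; the proofs are below) =====
def Claim_unchanged_f : Prop := ∀ (s : String), Dom_f s → Spec_f s (f s)
def Claim_changed_f : Prop := Dom_f (pvDiffWitness_f) ∧ D_f (pvDiffWitness_f) ∧ f (pvDiffWitness_f) = pvDiffWitnessOut_f.1 ∧ f_alt (pvDiffWitness_f) = pvDiffWitnessOut_f.2 ∧ pvDiffWitnessOut_f.1 ≠ pvDiffWitnessOut_f.2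
def Claim_exact_f : Prop := ∀ (s : String), Dom_f s → D_f s → f s ≠ f_alt s

-- ===== LEMMAS AND PROOFS =====

-- A's loop, characterised: from state (k, ch) it ends at min(ch :: l), with the tally being
-- the count of the new minimum (restarted at it) or k plus the count of ch if ch stays minimal.
theorem loopA (l : List Char) : ∀ (ch : Char) (k : Int),
    l.foldl (fun (st : Int × Char) c =>
        if c < st.2 then (1, c)
        else if c = st.2 then (st.1 + 1, st.2)
        else st) (k, ch)
      = (if l.foldl min ch < ch then (l.count (l.foldl min ch) : Int)
         else k + l.count ch,
         l.foldl min ch) := by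
  induction l with
  | nil => intro ch k; simp
  | cons c t ih =>
    intro ch k
    by_cases h1 : c < ch
    · simp only [List.foldl_cons, if_pos h1]
      rw [ih c 1]
      have hmin : min ch c = c := min_eq_right (le_of_lt h1)
      have hle : t.foldl min c ≤ c := (PySem.List.foldl_min_le t c).1
      rw [hmin, if_pos (lt_of_le_of_lt hle h1)]
      rcases lt_or_eq_of_le hle with hlt | heq
      · rw [if_pos hlt]
        simp [Ne.symm (ne_of_lt hlt)]
      · rw [heq, if_neg (lt_irrefl c)]
        simp
        ring
    · by_cases h2 : c = ch
      · subst h2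
        simp only [List.foldl_cons, min_self]
        rw [if_neg h1]
        simp only [eq_self_iff_true, if_true]
        rw [ih c (k + 1)]
        by_cases h3 : t.foldl min c < c
        · rw [if_pos h3, if_pos h3]
          simp [Ne.symm (ne_of_lt h3)]
        · rw [if_neg h3, if_neg h3]
          simp
          ring
      · have hgt : ch < c := lt_of_le_of_ne (not_lt.mp h1) (Ne.symm h2)
        simp only [List.foldl_cons, if_neg h1, if_neg h2]
        rw [ih ch k]
        rw [min_eq_left (le_of_lt hgt)]
        by_cases h3 : t.foldl min ch < ch
        · rw [if_pos h3, if_pos h3]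
          simp [Ne.symm (ne_of_lt (lt_trans h3 hgt))]
        · rw [if_neg h3, if_neg h3]
          simp [h2]

-- 'foldl min' pulls a min out of its seed.
theorem foldl_min_min (l : List Char) : ∀ (a b : Char),
    l.foldl min (min a b) = min a (l.foldl min b) := by
  induction l with
  | nil => intro a b; rfl
  | cons c t ih =>
    intro a b
    simp only [List.foldl_cons, min_assoc, ih]

theorem f_eq (s : String) :
    f s = (if s.toList.foldl min 'z' < 'z'
           then (s.toList.count (s.toList.foldl min 'z') : Int)
           else s.toList.count 'z') := by
  unfold f
  rw [loopA s.toList 'z' 0]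
  split_ifs <;> simp

theorem foldl_min_cons_mem (x : Char) (t : List Char) : t.foldl min x ∈ x :: t := by
  rcases PySem.List.foldl_min_mem t x with h1 | h1
  · rw [h1]; exact List.mem_cons_self
  · exact List.mem_cons_of_mem _ h1

-- ===== VERDICT (by name: the statement is the Claim_ definition above) =====
theorem f_spec : Claim_unchanged_f := by
  intro s _ hnd
  rw [f_eq]
  unfold D_f at hnd
  push_neg at hnd
  cases hl : s.toList with
  | nil =>
    unfold f_alt
    rw [hl]
    simp [PySem.List.min?]
  | cons x t =>
    unfold f_alt
    rw [hl] at hnd ⊢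
    rw [PySem.List.min?_id_cons]
    simp only [PySem.List.count]
    obtain ⟨c, hc, hcz⟩ := hnd (List.cons_ne_nil x t)
    have hM : (x :: t).foldl min 'z' = min 'z' (t.foldl min x) := by
      have h0 : (x :: t).foldl min 'z' = t.foldl min (min 'z' x) := rfl
      rw [h0, foldl_min_min]
    have hMle : t.foldl min x ≤ 'z' := by
      rcases List.mem_cons.mp hc with rfl | hct
      · exact le_trans (PySem.List.foldl_min_le t c).1 hcz
      · exact le_trans ((PySem.List.foldl_min_le t x).2 c hct) hcz
    rw [hM, min_eq_right hMle]
    rcases lt_or_eq_of_le hMle with hlt | heq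
    · rw [if_pos hlt]
    · rw [heq, if_neg (lt_irrefl _)]

theorem f_changed : Claim_changed_f := by
  unfold Claim_changed_f
  have hl : pvDiffWitness_f.toList = ['{'] := by decide
  refine ⟨by decide, ?_, ?_, ?_, by decide⟩
  · unfold D_f
    rw [hl]
    exact ⟨List.cons_ne_nil _ _, by intro c hc; simp at hc; subst hc; decide⟩
  · unfold f pvDiffWitness_f at *
    rw [hl]
    decide
  · unfold f_alt pvDiffWitness_f at *
    rw [hl]
    decide

theorem f_tight : Claim_exact_f := by
  intro s _ hd
  obtain ⟨hne, hall⟩ := hd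
  cases hl : s.toList with
  | nil => exact absurd hl hne
  | cons x t =>
    rw [hl] at hall
    have hA : f s = 0 := by
      rw [f_eq, hl]
      have hM : (x :: t).foldl min 'z' = min 'z' (t.foldl min x) := by
        have h0 : (x :: t).foldl min 'z' = t.foldl min (min 'z' x) := rfl
        rw [h0, foldl_min_min]
      have hgt : 'z' < t.foldl min x := hall _ (foldl_min_cons_mem x t)
      rw [hM, min_eq_left (le_of_lt hgt), if_neg (lt_irrefl _)]
      have hz0 : (x :: t).count 'z' = 0 := by
        rw [List.count_eq_zero]
        intro hz
        exact absurd rfl (ne_of_lt (hall _ hz))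
      simp [hz0]
    have hB : 0 < f_alt s := by
      unfold f_alt
      rw [hl, PySem.List.min?_id_cons]
      simp only [PySem.List.count]
      exact_mod_cast List.count_pos_iff.mpr (foldl_min_cons_mem x t)
    rw [hA]
    exact fun h => absurd h.symm (ne_of_gt hB)
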